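-- pv_equiv track=rewrite | github.com/RomainOr/Reasoning-with-ALCS | example/metrics/MazeMetrics.py | _when_full_knowledge_is_achieved
-- ===== SOURCE A (Python) =====
-- def _when_full_knowledge_is_achieved(metrics) -> tuple:
--     first_trial_when_full_knowledge = -1
--     stable_trial_when_full_knowledge = -1
--     last_trial_when_full_knowledge = -1
--     for trial in metrics:
--         if first_trial_when_full_knowledge == -1 and trial['knowledge'] == 100:
--             first_trial_when_full_knowledge = trial['trial']
--         if stable_trial_when_full_knowledge == -1 and trial['knowledge'] == 100:
--             stable_trial_when_full_knowledge = trial['trial']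
--         if stable_trial_when_full_knowledge != -1 and trial['knowledge'] != 100:
--             stable_trial_when_full_knowledge = -1
--         if trial['knowledge'] == 100:
--             last_trial_when_full_knowledge = trial['trial']
--     return first_trial_when_full_knowledge, stable_trial_when_full_knowledge, last_trial_when_full_knowledge
-- ===== SOURCE B (Python) =====
-- def _when_full_knowledge_is_achieved(metrics) -> tuple:
--     def first_full_trial(seq):
--         for t in seq:
--             if t['knowledge'] == 100:
--                 return t['trial']
--         return -1
--
--     rev = metrics[::-1]
--     first = first_full_trial(metrics)
--     last = first_full_trial(rev)
--     stable = -1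
--     if rev and rev[0]['knowledge'] == 100:
--         stable = rev[0]['trial']
--         for t in rev[1:]:
--             if t['knowledge'] != 100:
--                 break
--             stable = t['trial']
--     return first, stable, last
-- ===== Notes on version B (the rewrite author's own statement) =====
-- stated objective: alternative
-- what changed: Replaced A's single fused loop over three sentinel-tracking state variables by three separately-shaped passes: a forward scan for the first trial with knowledge==100, a reverse scan for the last one, and a backward walk along the trailing all-100 run for the stable trial.
import Mathlib
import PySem

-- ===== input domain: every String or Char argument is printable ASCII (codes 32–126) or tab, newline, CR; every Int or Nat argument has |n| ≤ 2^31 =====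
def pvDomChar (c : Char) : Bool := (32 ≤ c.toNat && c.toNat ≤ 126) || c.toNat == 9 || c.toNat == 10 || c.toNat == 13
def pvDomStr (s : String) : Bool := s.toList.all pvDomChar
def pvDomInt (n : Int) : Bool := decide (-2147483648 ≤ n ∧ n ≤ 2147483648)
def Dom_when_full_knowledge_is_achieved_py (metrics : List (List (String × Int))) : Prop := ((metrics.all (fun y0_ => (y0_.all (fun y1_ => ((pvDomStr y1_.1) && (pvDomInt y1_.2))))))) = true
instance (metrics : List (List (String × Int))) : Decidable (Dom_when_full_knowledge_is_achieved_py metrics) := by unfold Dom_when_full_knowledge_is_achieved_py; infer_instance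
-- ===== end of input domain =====

-- B computes the three results by three separately-shaped passes (forward scan, reverse scan,
-- backward walk along the trailing run) instead of A's fused loop over three sentinel variables.

-- d[k] on a Python dict modelled as an association list: first match (exact; none = KeyError)
def pvLook (t : List (String × Int)) (k : String) : Option Int :=
  (t.find? (fun p => p.1 == k)).map (·.2)

def pvKn (t : List (String × Int)) : Int := (pvLook t "knowledge").getD 0
def pvTr (t : List (String × Int)) : Int := (pvLook t "trial").getD 0

-- ===== PORT A =====
def when_full_knowledge_is_achieved_py (metrics : List (List (String × Int))) : Int × Int × Int :=
  metrics.foldl (fun (s : Int × Int × Int) t =>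
    let f := if s.1 = -1 ∧ pvKn t = 100 then pvTr t else s.1
    let st := if s.2.1 = -1 ∧ pvKn t = 100 then pvTr t else s.2.1
    let st2 := if st ≠ -1 ∧ pvKn t ≠ 100 then -1 else st
    let l := if pvKn t = 100 then pvTr t else s.2.2
    (f, st2, l)) (-1, -1, -1)

-- ===== PORT B =====
-- first_full_trial(seq): trial of the first element with knowledge == 100, else -1
def pvFirstFull : List (List (String × Int)) → Int
  | [] => -1
  | t :: rest => if pvKn t = 100 then pvTr t else pvFirstFull rest

-- the inner 'for t in rev[1:]' walk extending the trailing run backward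
def pvStableRun (s : Int) : List (List (String × Int)) → Int
  | [] => s
  | t :: rest => if pvKn t ≠ 100 then s else pvStableRun (pvTr t) rest

-- 'if rev and rev[0]['knowledge'] == 100: …' block of Source B
def pvStableHead : List (List (String × Int)) → Int
  | [] => -1
  | t :: rest => if pvKn t = 100 then pvStableRun (pvTr t) rest else -1

def when_full_knowledge_is_achieved_py_alt (metrics : List (List (String × Int))) : Int × Int × Int :=
  let rev := metrics.reverse
  let first := pvFirstFull metrics
  let last := pvFirstFull rev
  let stable := pvStableHead rev
  (first, stable, last)

-- ===== PRECONDITION & SPEC =====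
-- Pre_ excludes metrics on which A raises KeyError (an element without 'knowledge', or a
-- knowledge==100 element without 'trial'), and metrics where a knowledge==100 element has
-- trial == -1, a corner where the actual value collides with A's -1 'unset' sentinel and
-- neither program's answer is more specified than the other's.
def Pre_when_full_knowledge_is_achieved_py (metrics : List (List (String × Int))) : Prop :=
  ∀ t ∈ metrics, (pvLook t "knowledge").isSome = true ∧
    (pvKn t = 100 → (pvLook t "trial").isSome = true ∧ pvTr t ≠ -1)
instance (metrics : List (List (String × Int))) : Decidable (Pre_when_full_knowledge_is_achieved_py metrics) := by unfold Pre_when_full_knowledge_is_achieved_py; infer_instance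

def pvWitness_when_full_knowledge_is_achieved_py : (List (List (String × Int))) :=
  [[("knowledge", 50), ("trial", 0)], [("knowledge", 100), ("trial", 1)], [("knowledge", 100), ("trial", 2)]]

def Spec_when_full_knowledge_is_achieved_py (metrics : List (List (String × Int))) (out : Int × Int × Int) : Prop := out = when_full_knowledge_is_achieved_py_alt metrics
instance (metrics : List (List (String × Int))) (out : Int × Int × Int) : Decidable (Spec_when_full_knowledge_is_achieved_py metrics out) := by unfold Spec_when_full_knowledge_is_achieved_py; infer_instance

-- ===== CLAIM (what is proved, stated in full; the proofs are below) =====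
def Claim_equal_when_full_knowledge_is_achieved_py : Prop := ∀ (metrics : List (List (String × Int))), Dom_when_full_knowledge_is_achieved_py metrics → Pre_when_full_knowledge_is_achieved_py metrics → Spec_when_full_knowledge_is_achieved_py metrics (when_full_knowledge_is_achieved_py metrics)

-- ===== LEMMAS AND PROOFS =====

theorem pvStableRun_ne (s : Int) (l : List (List (String × Int))) (hs : s ≠ -1)
    (h : ∀ t ∈ l, pvKn t = 100 → pvTr t ≠ -1) : pvStableRun s l ≠ -1 := by
  induction l generalizing s with
  | nil => exact hs
  | cons u rest ih =>
    simp only [pvStableRun]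
    split
    · exact hs
    · rename_i hk
      exact ih (pvTr u) (h u (by simp) (not_not.mp hk)) (fun t ht => h t (by simp [ht]))

theorem pvStableRun_eq (x : Int) (rev : List (List (String × Int)))
    (h : ∀ t ∈ rev, pvKn t = 100 → pvTr t ≠ -1) :
    pvStableRun x rev = if pvStableHead rev = -1 then x else pvStableHead rev := by
  cases rev with
  | nil => simp [pvStableRun, pvStableHead]
  | cons u rest =>
    by_cases hk : pvKn u = 100
    · have hne : pvStableRun (pvTr u) rest ≠ -1 :=
        pvStableRun_ne _ _ (h u (by simp) hk) (fun t ht => h t (by simp [ht]))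
      simp [pvStableRun, pvStableHead, hk, hne]
    · simp [pvStableRun, pvStableHead, hk]

theorem pvFirstFull_append (xs : List (List (String × Int))) (t : List (String × Int))
    (h : ∀ u ∈ xs, pvKn u = 100 → pvTr u ≠ -1) :
    pvFirstFull (xs ++ [t]) =
      if pvFirstFull xs = -1 then (if pvKn t = 100 then pvTr t else -1) else pvFirstFull xs := by
  induction xs with
  | nil => simp [pvFirstFull]
  | cons u us ih =>
    by_cases hk : pvKn u = 100
    · have : pvTr u ≠ -1 := h u (by simp) hk
      simp [pvFirstFull, hk, this]
    · simpa [pvFirstFull, hk] using ih (fun v hv => h v (by simp [hv]))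

theorem pv_main (metrics : List (List (String × Int)))
    (hpre : Pre_when_full_knowledge_is_achieved_py metrics) :
    when_full_knowledge_is_achieved_py metrics = when_full_knowledge_is_achieved_py_alt metrics := by
  induction metrics using List.reverseRecOn with
  | nil => rfl
  | append_singleton xs t ih =>
    have hxs : Pre_when_full_knowledge_is_achieved_py xs :=
      fun u hu => hpre u (by simp [hu])
    have htr : ∀ u ∈ xs, pvKn u = 100 → pvTr u ≠ -1 :=
      fun u hu hk => ((hxs u hu).2 hk).2
    have htrrev : ∀ u ∈ xs.reverse, pvKn u = 100 → pvTr u ≠ -1 :=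
      fun u hu hk => htr u (List.mem_reverse.mp hu) hk
    have hA : when_full_knowledge_is_achieved_py (xs ++ [t]) =
        (fun (s : Int × Int × Int) t =>
          let f := if s.1 = -1 ∧ pvKn t = 100 then pvTr t else s.1
          let st := if s.2.1 = -1 ∧ pvKn t = 100 then pvTr t else s.2.1
          let st2 := if st ≠ -1 ∧ pvKn t ≠ 100 then -1 else st
          let l := if pvKn t = 100 then pvTr t else s.2.2
          (f, st2, l)) (when_full_knowledge_is_achieved_py xs) t := by
      simp [when_full_knowledge_is_achieved_py, List.foldl_append]
    rw [hA, ih hxs]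
    show _ = when_full_knowledge_is_achieved_py_alt (xs ++ [t])
    simp only [when_full_knowledge_is_achieved_py_alt, List.reverse_append,
      List.reverse_singleton, List.singleton_append]
    refine Prod.ext ?_ (Prod.ext ?_ ?_)
    · -- first component
      show (if pvFirstFull xs = -1 ∧ pvKn t = 100 then pvTr t else pvFirstFull xs) =
        pvFirstFull (xs ++ [t])
      rw [pvFirstFull_append xs t htr]
      by_cases hf : pvFirstFull xs = -1 <;> by_cases hk : pvKn t = 100 <;> simp [hf, hk]
    · -- stable component
      show (let st := if pvStableHead xs.reverse = -1 ∧ pvKn t = 100 then pvTr t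
                      else pvStableHead xs.reverse
            if st ≠ -1 ∧ pvKn t ≠ 100 then -1 else st) =
        pvStableHead (t :: xs.reverse)
      by_cases hk : pvKn t = 100
      · have := pvStableRun_eq (pvTr t) xs.reverse htrrev
        simp only [pvStableHead, hk, this]
        by_cases hs : pvStableHead xs.reverse = -1 <;> simp
      · simp only [pvStableHead, hk]
        by_cases hs : pvStableHead xs.reverse = -1 <;> simp [hk]
    · -- last component
      show (if pvKn t = 100 then pvTr t else pvFirstFull xs.reverse) =
        pvFirstFull (t :: xs.reverse)
      simp [pvFirstFull]

-- ===== VERDICT (by name: the statement is the Claim_ definition above) =====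
theorem when_full_knowledge_is_achieved_py_spec : Claim_equal_when_full_knowledge_is_achieved_py := by
  intro metrics _ hpre
  show _ = _
  exact pv_main metrics hpre
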